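-- pv_equiv track=rewrite | github.com/Martafmsousa/Marta_Sousa_CISEG1025 | Exercicios SORT/exercicio4.py | ordenar_por_minusculas
-- ===== SOURCE A (Python) =====
-- def contar_minusculas(palavra):
--     cont = 0
--     for letra in palavra:
--         if 'a' <= letra <= 'z':
--             cont += 1
--     return cont
--
-- def ordenar_por_minusculas(lista):
--     n = len(lista)
--
--     for i in range(n):
--         for j in range(0, n - 1):
--
--             p1 = contar_minusculas(lista[j])
--             p2 = contar_minusculas(lista[j + 1])
--
--             if p1 > p2:
--                 lista[j], lista[j+1] = lista[j+1], lista[j]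
--
--     return lista
-- ===== SOURCE B (Python) =====
-- def _cont_min(palavra):
--     cont = 0
--     for letra in palavra:
--         if 'a' <= letra <= 'z':
--             cont += 1
--     return cont
--
-- def ordenar_por_minusculas(lista):
--     if not lista:
--         return lista
--     maxc = max(_cont_min(w) for w in lista)
--     res = []
--     for c in range(maxc + 1):
--         res += [w for w in lista if _cont_min(w) == c]
--     lista[:] = res
--     return lista
-- ===== Notes on version B (the rewrite author's own statement) =====
-- stated objective: faster
-- what changed: Replaces A's quadratic bubble sort (n full passes of adjacent compare-and-swap) by a counting/bucket sort: one pass computes each word's lowercase-letter count, then the result is built by concatenating, for each count 0..max in ascending order, the words with that count in original order (stability for free).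
import Mathlib
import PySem

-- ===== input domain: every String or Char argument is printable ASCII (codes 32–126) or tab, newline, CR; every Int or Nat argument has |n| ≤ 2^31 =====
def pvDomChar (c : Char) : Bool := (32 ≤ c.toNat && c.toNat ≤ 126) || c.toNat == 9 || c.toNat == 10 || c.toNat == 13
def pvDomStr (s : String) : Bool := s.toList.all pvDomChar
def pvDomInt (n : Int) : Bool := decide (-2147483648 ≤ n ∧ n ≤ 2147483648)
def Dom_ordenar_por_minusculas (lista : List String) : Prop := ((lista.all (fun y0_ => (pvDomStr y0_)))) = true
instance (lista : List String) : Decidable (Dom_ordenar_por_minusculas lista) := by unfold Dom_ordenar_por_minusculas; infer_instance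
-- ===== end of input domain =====

-- B replaces A's O(n^2) bubble sort by a counting/bucket sort over the lowercase-count key
-- (one bucket per count 0..max, concatenated in ascending order); both mutate `lista` in place.

-- ===== PORT A =====
def contar_minusculas (palavra : String) : Int :=
  palavra.toList.foldl (fun cont letra => if 'a' ≤ letra ∧ letra ≤ 'z' then cont + 1 else cont) 0

def ordenar_por_minusculas (lista : List String) : List String :=
  let n : Int := lista.length
  (PySem.List.pyRange 0 n 1).foldl
    (fun l _i =>
      (PySem.List.pyRange 0 (n - 1) 1).foldl
        (fun l j =>
          let p1 := contar_minusculas (PySem.List.pyGetD l j "")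
          let p2 := contar_minusculas (PySem.List.pyGetD l (j + 1) "")
          if p1 > p2 then
            PySem.List.pySetD (PySem.List.pySetD l j (PySem.List.pyGetD l (j + 1) ""))
              (j + 1) (PySem.List.pyGetD l j "")
          else l)
        l)
    lista

-- ===== PORT B =====
def cont_min_alt (palavra : String) : Int :=
  palavra.toList.foldl (fun cont letra => if 'a' ≤ letra ∧ letra ≤ 'z' then cont + 1 else cont) 0

def ordenar_por_minusculas_alt (lista : List String) : List String :=
  if lista = [] then lista
  else
    match PySem.List.max? (lista.map cont_min_alt) (fun x => x) with
    | none => lista   -- unreachable: lista ≠ []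
    | some maxc =>
      (PySem.List.pyRange 0 (maxc + 1) 1).foldl
        (fun res c => res ++ lista.filter (fun w => cont_min_alt w = c)) []

-- ===== PRECONDITION & SPEC =====
def Spec_ordenar_por_minusculas (lista : List String) (out : List String) : Prop := out = ordenar_por_minusculas_alt lista
instance (lista : List String) (out : List String) : Decidable (Spec_ordenar_por_minusculas lista out) := by unfold Spec_ordenar_por_minusculas; infer_instance

-- ===== CLAIM (what is proved, stated in full; the proofs are below) =====
def Claim_equal_ordenar_por_minusculas : Prop := ∀ (lista : List String), Dom_ordenar_por_minusculas lista → Spec_ordenar_por_minusculas lista (ordenar_por_minusculas lista)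

-- ===== LEMMAS AND PROOFS =====

-- the two helpers are the same function
theorem cont_alt_eq : cont_min_alt = contar_minusculas := rfl

-- the key-order relation A sorts by
def pvLe (x y : String) : Prop := contar_minusculas x ≤ contar_minusculas y

-- one recursive bubble pass (proof-side model of A's inner index loop)
def pvPass : List String → List String
  | [] => []
  | [a] => [a]
  | a :: b :: t =>
    if contar_minusculas b < contar_minusculas a then b :: pvPass (a :: t) else a :: pvPass (b :: t)
termination_by l => l.length
decreasing_by all_goals simp

theorem length_pvPass (l : List String) : (pvPass l).length = l.length := by
  fun_induction pvPass with
  | case1 => rfl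
  | case2 => rfl
  | case3 a b t h ih => simpa using ih
  | case4 a b t h ih => simpa using ih

theorem pvPass_sorted (l : List String) (h : l.Pairwise pvLe) : pvPass l = l := by
  fun_induction pvPass with
  | case1 => rfl
  | case2 => rfl
  | case3 a b t hlt ih =>
    exfalso
    have := (List.pairwise_cons.1 h).1 b (by simp)
    unfold pvLe at this; omega
  | case4 a b t hlt ih =>
    have ht : (b :: t).Pairwise pvLe := (List.pairwise_cons.1 h).2
    simp [ih ht]

theorem filter_pvPass (l : List String) (p : Int) :
    (pvPass l).filter (fun w => contar_minusculas w = p)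
      = l.filter (fun w => contar_minusculas w = p) := by
  fun_induction pvPass with
  | case1 => rfl
  | case2 => rfl
  | case3 a b t hlt ih =>
    simp only [List.filter_cons] at *
    by_cases hb : contar_minusculas b = p <;> by_cases ha : contar_minusculas a = p <;>
      simp_all
  | case4 a b t hlt ih =>
    simp only [List.filter_cons] at *
    by_cases hb : contar_minusculas b = p <;> by_cases ha : contar_minusculas a = p <;>
      simp_all

-- core bubble lemma: one pass over front ++ back (back sorted, dominating front)
-- carries a maximum of front to the head of back

-- core bubble lemma: one pass over front ++ back (back sorted and dominating front)
-- carries a maximum of front to the head of back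
theorem pvPass_split :
    ∀ (nn : Nat) (front back : List String), front.length ≤ nn → front ≠ [] →
    back.Pairwise pvLe → (∀ x ∈ front, ∀ y ∈ back, pvLe x y) →
    ∃ front' m, pvPass (front ++ back) = front' ++ m :: back ∧
      front'.length + 1 = front.length ∧ m ∈ front ∧
      (∀ x ∈ front, pvLe x m) ∧ (∀ x ∈ front', pvLe x m) := by
  intro nn
  induction nn with
  | zero => intro front back hlen hne; simp [List.length_eq_zero_iff.1 (Nat.le_zero.1 hlen)] at hne
  | succ n ih =>
    intro front back hlen hne hb hcross
    match front with
    | [a] =>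
      refine ⟨[], a, ?_, by simp, by simp, by simp [pvLe], by simp⟩
      simp only [List.singleton_append, List.nil_append]
      cases back with
      | nil => simp [pvPass]
      | cons y back' =>
        have hay : pvLe a y := hcross a (by simp) y (by simp)
        unfold pvLe at hay
        rw [pvPass]
        rw [if_neg (by omega)]
        rw [pvPass_sorted _ hb]
    | a :: b :: f =>
      have hcross' : ∀ x ∈ a :: b :: f, ∀ y ∈ back, pvLe x y := hcross
      rw [List.cons_append, List.cons_append, pvPass]
      by_cases hab : contar_minusculas b < contar_minusculas a
      · rw [if_pos hab]
        have := ih (a :: f) back (by simp at hlen ⊢; omega) (by simp)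
          hb (by intro x hx y hy; exact hcross x (by simp at hx ⊢; tauto) y hy)
        obtain ⟨front'', m, heq, hlen'', hm, hmax, hmax'⟩ := this
        rw [List.cons_append] at heq
        refine ⟨b :: front'', m, by rw [heq]; simp, by simp at hlen'' ⊢; omega, ?_, ?_, ?_⟩
        · simp at hm ⊢; tauto
        · intro x hx
          rcases List.mem_cons.1 hx with rfl | hx'
          · exact hmax x (by simp)
          · rcases List.mem_cons.1 hx' with rfl | hx''
            · have ha := hmax a (by simp)
              unfold pvLe at *; omega
            · exact hmax x (by simp [hx''])
        · intro x hx
          rcases List.mem_cons.1 hx with rfl | hx'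
          · have ha := hmax a (by simp)
            unfold pvLe at *; omega
          · exact hmax' x hx'
      · rw [if_neg hab]
        have := ih (b :: f) back (by simp at hlen ⊢; omega) (by simp)
          hb (by intro x hx y hy; exact hcross x (by simp at hx ⊢; tauto) y hy)
        obtain ⟨front'', m, heq, hlen'', hm, hmax, hmax'⟩ := this
        rw [List.cons_append] at heq
        refine ⟨a :: front'', m, by rw [heq]; simp, by simp at hlen'' ⊢; omega, ?_, ?_, ?_⟩
        · simp at hm ⊢; tauto
        · intro x hx
          rcases List.mem_cons.1 hx with rfl | hx'
          · have hbm := hmax b (by simp)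
            unfold pvLe at *; omega
          · exact hmax x hx'
        · intro x hx
          rcases List.mem_cons.1 hx with rfl | hx'
          · have hbm := hmax b (by simp)
            unfold pvLe at *; omega
          · exact hmax' x hx'

theorem set_set_swap (l : List String) (j : Nat) (h : j + 1 < l.length) (b a : String) :
    (l.set j b).set (j+1) a = l.take j ++ b :: a :: l.drop (j+2) := by
  rw [List.set_eq_take_cons_drop b (by omega),
      List.drop_eq_getElem_cons (show j + 1 < l.length by omega),
      List.set_append]
  simp only [List.length_take, min_eq_left (by omega : j ≤ l.length)]
  rw [if_neg (by omega)]
  have h1 : j + 1 - j = 1 := by omega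
  rw [h1]
  simp only [List.set_cons_succ, List.set_cons_zero]

-- A's inner index loop from index j equals the recursive pass on the suffix
theorem inner_from (n : Int) :
    ∀ (d j : Nat) (l : List String), (l.length : Int) = n → l.length = j + d →
    (PySem.List.pyRange (j : Int) (n - 1) 1).foldl
        (fun l j =>
          let p1 := contar_minusculas (PySem.List.pyGetD l j "")
          let p2 := contar_minusculas (PySem.List.pyGetD l (j + 1) "")
          if p1 > p2 then
            PySem.List.pySetD (PySem.List.pySetD l j (PySem.List.pyGetD l (j + 1) ""))
              (j + 1) (PySem.List.pyGetD l j "")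
          else l) l
      = l.take j ++ pvPass (l.drop j) := by
  intro d
  induction d with
  | zero =>
    intro j l hn hlen
    rw [PySem.List.pyRange_one_eq_nil (by omega)]
    have hdre : l.drop j = [] := List.drop_eq_nil_of_le (by omega)
    simp [hdre, pvPass, List.take_of_length_le (by omega : l.length ≤ j)]
  | succ d ih =>
    intro j l hn hlen
    by_cases hd : d = 0
    · subst hd
      rw [PySem.List.pyRange_one_eq_nil (by omega)]
      obtain ⟨a, ha⟩ : ∃ a, l.drop j = [a] := by
        have h1 : (l.drop j).length = 1 := by simp; omega
        match hh : l.drop j with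
        | [a] => exact ⟨a, rfl⟩
        | [] | _ :: _ :: _ => rw [hh] at h1; simp at h1
      simp only [List.foldl_nil, ha, pvPass]
      conv_lhs => rw [← List.take_append_drop j l, ha]
    · have hjlt : j + 1 < l.length := by omega
      rw [PySem.List.pyRange_one_cons (by omega)]
      rw [List.foldl_cons]
      have hdrop : l.drop j = l[j] :: l[j+1] :: l.drop (j+2) := by
        rw [List.drop_eq_getElem_cons (by omega)]
        congr 1
        rw [List.drop_eq_getElem_cons (by omega)]
      set a := l[j] with hadef
      set b := l[j+1]'(by omega) with hbdef
      have hga : PySem.List.pyGetD l (j : Int) "" = a := by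
        rw [PySem.List.pyGetD_eq_getElem l "" (by omega) (by omega)]
        simp
        exact rfl
      have hcast : ((j : Int) + 1) = ((j + 1 : Nat) : Int) := by push_cast; ring
      have hgb : PySem.List.pyGetD l ((j : Int) + 1) "" = b := by
        rw [hcast, PySem.List.pyGetD_eq_getElem l "" (by omega) (by omega)]
        simp
        exact rfl
      simp only [hga, hgb]
      have htake : ∀ (s : List String), s = l.take j ++ b :: a :: l.drop (j+2) →
          s.take (j+1) = l.take j ++ [b] ∧ s.drop (j+1) = a :: l.drop (j+2) := by
        intro s hs
        subst hs
        have hlt : (l.take j).length = j := by simp; omega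
        constructor
        · rw [List.take_append]
          rw [hlt]
          simp
        · rw [List.drop_append]
          rw [hlt]
          simp
      by_cases hsw : contar_minusculas a > contar_minusculas b
      · rw [if_pos hsw]
        have hset : PySem.List.pySetD (PySem.List.pySetD l (j : Int) b) ((j : Int) + 1) a
            = l.take j ++ b :: a :: l.drop (j + 2) := by
          rw [PySem.List.pySetD_natCast, hcast, PySem.List.pySetD_natCast]
          exact set_set_swap l j hjlt b a
        rw [hset]
        have hlen2 : (l.take j ++ b :: a :: l.drop (j + 2)).length = l.length := by
          simp; omega
        have := ih (j+1) (l.take j ++ b :: a :: l.drop (j + 2))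
          (by rw [hlen2]; exact hn) (by rw [hlen2]; omega)
        rw [hcast, this]
        obtain ⟨ht, hdr⟩ := htake _ rfl
        rw [ht, hdr, hdrop, pvPass, if_pos (by omega)]
        simp
      · rw [if_neg hsw]
        have := ih (j+1) l hn (by omega)
        rw [hcast, this]
        have ht : l.take (j+1) = l.take j ++ [a] := by
          rw [List.take_add_one]
          simp [hadef, List.getElem?_eq_getElem (by omega : j < l.length)]
        have hdr : l.drop (j+1) = b :: l.drop (j+2) := by
          rw [List.drop_eq_getElem_cons (by omega)]
        rw [ht, hdr, hdrop, pvPass, if_neg (by omega)]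
        simp

theorem foldl_const_iterate {α β : Type} (f : α → α) :
    ∀ (xs : List β) (init : α), xs.foldl (fun l _ => f l) init = f^[xs.length] init := by
  intro xs
  induction xs with
  | nil => intro init; rfl
  | cons x t ih =>
    intro init
    rw [List.foldl_cons, ih, List.length_cons, Function.iterate_succ_apply]

-- A's result is lista.length bubble passes
theorem ordenar_eq_iterate (lista : List String) :
    ordenar_por_minusculas lista = pvPass^[lista.length] lista := by
  unfold ordenar_por_minusculas
  rw [foldl_const_iterate]
  have hlen : (PySem.List.pyRange 0 (lista.length : Int) 1).length = lista.length := by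
    rw [PySem.List.length_pyRange_one]; omega
  rw [hlen]
  -- both iterates agree while the length is preserved
  suffices h : ∀ (k : Nat) (l : List String), l.length = lista.length →
      (fun l => (PySem.List.pyRange 0 ((lista.length : Int) - 1) 1).foldl
        (fun l j =>
          let p1 := contar_minusculas (PySem.List.pyGetD l j "")
          let p2 := contar_minusculas (PySem.List.pyGetD l (j + 1) "")
          if p1 > p2 then
            PySem.List.pySetD (PySem.List.pySetD l j (PySem.List.pyGetD l (j + 1) ""))
              (j + 1) (PySem.List.pyGetD l j "")
          else l) l)^[k] l = pvPass^[k] l by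
    exact h lista.length lista rfl
  intro k
  induction k with
  | zero => intro l _; rfl
  | succ k ih =>
    intro l hl
    rw [Function.iterate_succ_apply, Function.iterate_succ_apply]
    have hstep : (PySem.List.pyRange 0 ((lista.length : Int) - 1) 1).foldl
        (fun l j =>
          let p1 := contar_minusculas (PySem.List.pyGetD l j "")
          let p2 := contar_minusculas (PySem.List.pyGetD l (j + 1) "")
          if p1 > p2 then
            PySem.List.pySetD (PySem.List.pySetD l j (PySem.List.pyGetD l (j + 1) ""))
              (j + 1) (PySem.List.pyGetD l j "")
          else l) l = pvPass l := by
      have := inner_from (lista.length : Int) l.length 0 l (by rw [hl]) (by omega)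
      simpa using this
    rw [hstep]
    exact ih (pvPass l) (by rw [length_pvPass, hl])

-- after i passes a sorted, dominating suffix of length ≥ i has formed
theorem iterate_invariant (lista : List String) :
    ∀ (i : Nat), i ≤ lista.length →
    ∃ front back, pvPass^[i] lista = front ++ back ∧ back.Pairwise pvLe ∧
      (∀ x ∈ front, ∀ y ∈ back, pvLe x y) ∧ front.length + i ≤ lista.length := by
  intro i
  induction i with
  | zero =>
    intro _
    exact ⟨lista, [], by simp, by simp, by simp, by omega⟩
  | succ i ih =>
    intro hi
    obtain ⟨front, back, heq, hb, hcross, hlen⟩ := ih (by omega)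
    rw [Function.iterate_succ_apply', heq]
    by_cases hf : front = []
    · subst hf
      rw [List.nil_append, pvPass_sorted back hb]
      exact ⟨[], back, by simp, hb, by simp, by simp; omega⟩
    · obtain ⟨front', m, heq', hlen', hm, _, hmax'⟩ :=
        pvPass_split front.length front back (le_refl _) hf hb hcross
      refine ⟨front', m :: back, heq', ?_, ?_, by omega⟩
      · rw [List.pairwise_cons]
        exact ⟨fun y hy => hcross m hm y hy, hb⟩
      · intro x hx y hy
        rcases List.mem_cons.1 hy with rfl | hy'
        · exact hmax' x hx
        · have h1 := hmax' x hx
          have h2 := hcross m hm y hy'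
          unfold pvLe at *; omega

theorem iterate_sorted (lista : List String) :
    (pvPass^[lista.length] lista).Pairwise pvLe := by
  obtain ⟨front, back, heq, hb, hcross, hlen⟩ :=
    iterate_invariant lista lista.length (le_refl _)
  have hf : front = [] := by
    have := List.length_eq_zero_iff.1 (by omega : front.length = 0)
    exact this
  rw [heq, hf, List.nil_append]
  exact hb

theorem iterate_filter (lista : List String) (k : Nat) (p : Int) :
    (pvPass^[k] lista).filter (fun w => contar_minusculas w = p)
      = lista.filter (fun w => contar_minusculas w = p) := by
  induction k generalizing lista with
  | zero => rfl
  | succ k ih =>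
    rw [Function.iterate_succ_apply, ih, filter_pvPass]

-- uniqueness: a key-sorted list is determined by its per-key filters
theorem sorted_filter_unique :
    ∀ (ys zs : List String), ys.Pairwise pvLe → zs.Pairwise pvLe →
    (∀ p : Int, ys.filter (fun w => contar_minusculas w = p)
        = zs.filter (fun w => contar_minusculas w = p)) → ys = zs := by
  intro ys
  induction ys with
  | nil =>
    intro zs _ _ hf
    cases zs with
    | nil => rfl
    | cons z zs' =>
      have := hf (contar_minusculas z)
      simp at this
  | cons y ys' ih =>
    intro zs hys hzs hf
    cases zs with
    | nil =>
      have := hf (contar_minusculas y)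
      simp at this
    | cons z zs' =>
      -- keys of heads equal
      have hyz : contar_minusculas y = contar_minusculas z := by
        -- y's key appears in z :: zs', so key z ≤ key y; symmetric
        have h1 : ∃ w ∈ z :: zs', contar_minusculas w = contar_minusculas y := by
          have := hf (contar_minusculas y)
          simp at this
          have hmem : y ∈ (z :: zs').filter (fun w => contar_minusculas w = contar_minusculas y) := by
            rw [← hf (contar_minusculas y)]; simp
          exact ⟨y, List.mem_of_mem_filter hmem, by simp⟩
        have h2 : ∃ w ∈ y :: ys', contar_minusculas w = contar_minusculas z := by
          have hmem : z ∈ (y :: ys').filter (fun w => contar_minusculas w = contar_minusculas z) := by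
            rw [hf (contar_minusculas z)]; simp
          exact ⟨z, List.mem_of_mem_filter hmem, by simp⟩
        obtain ⟨w1, hw1, hk1⟩ := h1
        obtain ⟨w2, hw2, hk2⟩ := h2
        rcases List.mem_cons.1 hw1 with rfl | hw1'
        · omega
        · have hz := (List.pairwise_cons.1 hzs).1 w1 hw1'
          rcases List.mem_cons.1 hw2 with rfl | hw2'
          · omega
          · have hy := (List.pairwise_cons.1 hys).1 w2 hw2'
            unfold pvLe at hz hy; omega
      have hk := hf (contar_minusculas y)
      rw [List.filter_cons, List.filter_cons] at hk
      simp [hyz] at hk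
      obtain ⟨rfl, htl0⟩ := hk
      have : ys' = zs' := by
        apply ih zs' (List.pairwise_cons.1 hys).2 (List.pairwise_cons.1 hzs).2
        intro p
        by_cases hp : p = contar_minusculas y
        · subst hp; exact htl0
        · have := hf p
          rw [List.filter_cons, List.filter_cons] at this
          simp [Ne.symm hp] at this
          simpa [hyz, Ne.symm hp] using this
      rw [this]

theorem contar_nonneg (w : String) : 0 ≤ contar_minusculas w := by
  unfold contar_minusculas
  suffices h : ∀ (cs : List Char) (acc : Int), 0 ≤ acc →
      0 ≤ cs.foldl (fun cont letra => if 'a' ≤ letra ∧ letra ≤ 'z' then cont + 1 else cont) acc by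
    exact h _ 0 (le_refl 0)
  intro cs
  induction cs with
  | nil => intro acc h; simpa using h
  | cons c t ih =>
    intro acc h
    rw [List.foldl_cons]
    split_ifs <;> [exact ih _ (by omega); exact ih _ h]

theorem foldl_opt_isSome {α β : Type} (g : Option α → β → Option α)
    (hg : ∀ m x, (g (some m) x).isSome) :
    ∀ (t : List β) (a : α), (List.foldl g (some a) t).isSome := by
  intro t
  induction t with
  | nil => intro a; rfl
  | cons b t ih =>
    intro a
    rw [List.foldl_cons]
    obtain ⟨r, hr⟩ := Option.isSome_iff_exists.1 (hg a b)
    rw [hr]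
    exact ih r

theorem max?_some_of_ne_nil (xs : List Int) (h : xs ≠ []) :
    ∃ m, PySem.List.max? xs (fun x => x) = some m := by
  rw [← Option.isSome_iff_exists]
  cases xs with
  | nil => simp at h
  | cons a t =>
    show (PySem.List.max? (a :: t) (fun x => x)).isSome
    simp only [PySem.List.max?, List.foldl_cons]
    apply foldl_opt_isSome
    intro m x
    dsimp only
    split <;> rfl

theorem flatMap_if_single {B : List String} (p : Int) :
    ∀ (cs : List Int), cs.Nodup →
      cs.flatMap (fun c => if c = p then B else []) = if p ∈ cs then B else [] := by
  intro cs
  induction cs with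
  | nil => simp
  | cons c t ih =>
    intro hnd
    rw [List.flatMap_cons, ih (List.nodup_cons.1 hnd).2]
    by_cases hc : c = p
    · subst hc
      simp [(List.nodup_cons.1 hnd).1]
    · simp [hc, Ne.symm hc]

theorem alt_eq_flatMap (lista : List String) (h : lista ≠ []) (maxc : Int)
    (hm : PySem.List.max? (lista.map cont_min_alt) (fun x => x) = some maxc) :
    ordenar_por_minusculas_alt lista
      = (PySem.List.pyRange 0 (maxc + 1) 1).flatMap
          (fun c => lista.filter (fun w => contar_minusculas w = c)) := by
  unfold ordenar_por_minusculas_alt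
  rw [if_neg h, hm]
  dsimp only
  rw [PySem.List.foldl_append_eq_flatMap]
  rw [List.nil_append, cont_alt_eq]

-- B's result is sorted by the key and keeps every per-key filter of lista
theorem alt_sorted (lista : List String) :
    (ordenar_por_minusculas_alt lista).Pairwise pvLe := by
  by_cases h : lista = []
  · simp [ordenar_por_minusculas_alt, h]
  · obtain ⟨maxc, hm⟩ := max?_some_of_ne_nil (lista.map cont_min_alt) (by simpa using h)
    rw [alt_eq_flatMap lista h maxc hm]
    rw [List.pairwise_flatMap]
    constructor
    · intro c _
      apply List.pairwise_of_forall_mem_list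
      intro x hx y hy
      have hxc : contar_minusculas x = c := by simpa using (List.mem_filter.1 hx).2
      have hyc : contar_minusculas y = c := by simpa using (List.mem_filter.1 hy).2
      unfold pvLe; omega
    · have hpw := PySem.List.pairwise_lt_pyRange_one (a := 0) (b := maxc + 1)
      apply hpw.imp_of_mem (by
        intro c1 c2 _ _ hlt x hx y hy
        have hxc : contar_minusculas x = c1 := by simpa using (List.mem_filter.1 hx).2
        have hyc : contar_minusculas y = c2 := by simpa using (List.mem_filter.1 hy).2
        unfold pvLe; omega)

theorem alt_filter (lista : List String) (p : Int) :
    (ordenar_por_minusculas_alt lista).filter (fun w => contar_minusculas w = p)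
      = lista.filter (fun w => contar_minusculas w = p) := by
  by_cases h : lista = []
  · simp [ordenar_por_minusculas_alt, h]
  · obtain ⟨maxc, hm⟩ := max?_some_of_ne_nil (lista.map cont_min_alt) (by simpa using h)
    rw [alt_eq_flatMap lista h maxc hm]
    rw [List.filter_flatMap]
    have hinner : ∀ c : Int,
        (lista.filter (fun w => contar_minusculas w = c)).filter (fun w => contar_minusculas w = p)
          = if c = p then lista.filter (fun w => contar_minusculas w = p) else [] := by
      intro c
      by_cases hc : c = p
      · subst hc
        simp [List.filter_filter]
      · rw [if_neg hc]
        rw [List.filter_eq_nil_iff]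
        intro w hw
        have hwc : contar_minusculas w = c := by simpa using (List.mem_filter.1 hw).2
        simp
        omega
    simp only [hinner]
    rw [flatMap_if_single p _ (PySem.List.nodup_pyRange_one 0 (maxc + 1))]
    by_cases hp : p ∈ PySem.List.pyRange 0 (maxc + 1) 1
    · rw [if_pos hp]
    · rw [if_neg hp]
      symm
      rw [List.filter_eq_nil_iff]
      intro w hw
      have h0 := contar_nonneg w
      have hle : contar_minusculas w ≤ maxc := by
        have := PySem.List.max?_isMax hm (contar_minusculas w)
          (by rw [cont_alt_eq]; exact List.mem_map_of_mem hw)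
        simpa using this
      rw [PySem.List.mem_pyRange_one] at hp
      simp
      omega

-- ===== VERDICT (by name: the statement is the Claim_ definition above) =====
theorem ordenar_por_minusculas_spec : Claim_equal_ordenar_por_minusculas := by
  intro lista _
  unfold Spec_ordenar_por_minusculas
  apply sorted_filter_unique
  · rw [ordenar_eq_iterate]; exact iterate_sorted lista
  · exact alt_sorted lista
  · intro p
    rw [ordenar_eq_iterate, iterate_filter, alt_filter]
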